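-- pv_equiv track=rewrite | github.com/Inc44/ManRad | Delta.py | merge_small_deltas
-- ===== SOURCE A (Python) =====
-- def merge_small_deltas(deltas, threshold=50):
-- 	if not deltas:
-- 		return []
-- 	merged_deltas = []
-- 	current_group = deltas[0]
-- 	for i in range(1, len(deltas)):
-- 		if deltas[i] < threshold:
-- 			current_group += deltas[i]
-- 		else:
-- 			merged_deltas.append(current_group)
-- 			current_group = deltas[i]
-- 	merged_deltas.append(current_group)
-- 	return merged_deltas
-- ===== SOURCE B (Python) =====
-- def merge_small_deltas(deltas, threshold=50):
-- 	# Greedy chunking: repeatedly locate the end j of the current maximal group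
-- 	# (the element at i plus the following run of below-threshold elements),
-- 	# emit the sum of that slice, and continue from j.
-- 	groups = []
-- 	i, n = 0, len(deltas)
-- 	while i < n:
-- 		j = i + 1
-- 		while j < n and deltas[j] < threshold:
-- 			j += 1
-- 		groups.append(sum(deltas[i:j]))
-- 		i = j
-- 	return groups
-- ===== Notes on version B (the rewrite author's own statement) =====
-- stated objective: alternative
-- what changed: Replaces A's single streaming pass with an explicit running-group accumulator by a greedy chunking recursion: each step isolates the maximal group (head plus following run of below-threshold elements), sums that slice, and recurses on the remainder.
import Mathlib
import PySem

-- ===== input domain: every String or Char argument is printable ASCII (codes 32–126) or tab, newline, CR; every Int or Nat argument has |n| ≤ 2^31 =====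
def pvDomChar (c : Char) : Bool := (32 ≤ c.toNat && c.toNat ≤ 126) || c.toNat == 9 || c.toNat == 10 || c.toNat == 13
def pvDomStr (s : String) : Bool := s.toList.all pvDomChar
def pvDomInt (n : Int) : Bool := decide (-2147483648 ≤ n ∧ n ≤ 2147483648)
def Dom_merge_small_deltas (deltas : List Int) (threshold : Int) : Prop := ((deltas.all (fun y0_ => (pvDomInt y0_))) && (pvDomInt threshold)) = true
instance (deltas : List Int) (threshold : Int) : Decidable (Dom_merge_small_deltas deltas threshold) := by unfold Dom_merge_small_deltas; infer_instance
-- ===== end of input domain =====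

-- B replaces A's streaming accumulator loop by a greedy chunking recursion
-- (peel off one maximal group at a time and sum it); alternative decomposition, same cost.


-- ===== PORT A =====
-- for i in range(1, len(deltas)): state = (merged_deltas, current_group)
def merge_small_deltas (deltas : List Int) (threshold : Int) : List Int :=
  match deltas with
  | [] => []
  | d0 :: _ =>
    let p := (PySem.List.pyRange 1 (deltas.length : Int) 1).foldl
      (fun (st : List Int × Int) i =>
        let di := PySem.List.pyGetD deltas i 0
        if di < threshold then (st.1, st.2 + di) else (st.1 ++ [st.2], di))
      ([], d0)
    p.1 ++ [p.2]

-- ===== PORT B =====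
-- Source B: recursion on the remaining suffix (index i in Source B); the inner while that finds the
-- chunk end j is the takeWhile/dropWhile of the suffix's tail; sum(deltas[i:j]) = head + run sum.
def merge_small_deltas_alt (deltas : List Int) (threshold : Int) : List Int :=
  match deltas with
  | [] => []
  | x :: xs =>
    (x + (xs.takeWhile (fun d => decide (d < threshold))).sum)
      :: merge_small_deltas_alt (xs.dropWhile (fun d => decide (d < threshold))) threshold
termination_by deltas.length
decreasing_by
  simpa using Nat.lt_succ_of_le (List.length_dropWhile_le _ _)

-- ===== PRECONDITION & SPEC =====
def Spec_merge_small_deltas (deltas : List Int) (threshold : Int) (out : List Int) : Prop := out = merge_small_deltas_alt deltas threshold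
instance (deltas : List Int) (threshold : Int) (out : List Int) : Decidable (Spec_merge_small_deltas deltas threshold out) := by unfold Spec_merge_small_deltas; infer_instance

-- ===== CLAIM (what is proved, stated in full; the proofs are below) =====
def Claim_equal_merge_small_deltas : Prop := ∀ (deltas : List Int) (threshold : Int), Dom_merge_small_deltas deltas threshold → Spec_merge_small_deltas deltas threshold (merge_small_deltas deltas threshold)

-- ===== LEMMAS AND PROOFS =====

theorem pvAlt_nil (threshold : Int) : merge_small_deltas_alt [] threshold = [] := by
  rw [merge_small_deltas_alt.eq_def]

theorem pvAlt_cons (x : Int) (xs : List Int) (threshold : Int) :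
    merge_small_deltas_alt (x :: xs) threshold
      = (x + (xs.takeWhile (fun d => decide (d < threshold))).sum)
          :: merge_small_deltas_alt (xs.dropWhile (fun d => decide (d < threshold))) threshold := by
  rw [merge_small_deltas_alt.eq_def]

-- A's loop body, over the element values (the index form reduces to this via foldl_pyRange_pyGetD').
def pvStep (threshold : Int) (st : List Int × Int) (di : Int) : List Int × Int :=
  if di < threshold then (st.1, st.2 + di) else (st.1 ++ [st.2], di)

theorem pvLoop_eq (threshold : Int) :
    ∀ (xs merged : List Int) (cur : Int),
      (xs.foldl (pvStep threshold) (merged, cur)).1 ++ [(xs.foldl (pvStep threshold) (merged, cur)).2]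
        = merged ++ (cur + (xs.takeWhile (fun d => decide (d < threshold))).sum)
            :: merge_small_deltas_alt (xs.dropWhile (fun d => decide (d < threshold))) threshold := by
  intro xs
  induction xs with
  | nil =>
    intro merged cur
    simp [pvAlt_nil]
  | cons x xs ih =>
    intro merged cur
    by_cases hx : x < threshold
    · simp only [List.foldl_cons, pvStep, if_pos hx, List.takeWhile_cons, List.dropWhile_cons,
        decide_eq_true hx]
      rw [ih]
      simp [add_assoc]
    · simp only [List.foldl_cons, pvStep, if_neg hx, List.takeWhile_cons, List.dropWhile_cons,
        decide_eq_false hx]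
      rw [ih]
      simp [pvAlt_cons]

-- ===== VERDICT (by name: the statement is the Claim_ definition above) =====
theorem merge_small_deltas_spec : Claim_equal_merge_small_deltas := by
  intro deltas threshold _
  unfold Spec_merge_small_deltas
  match deltas with
  | [] => simp [merge_small_deltas, pvAlt_nil]
  | d0 :: xs =>
    show ((PySem.List.pyRange 1 (((d0 :: xs).length : Int)) 1).foldl
        (fun st i => pvStep threshold st (PySem.List.pyGetD (d0 :: xs) i 0)) ([], d0)).1
      ++ [((PySem.List.pyRange 1 (((d0 :: xs).length : Int)) 1).foldl
        (fun st i => pvStep threshold st (PySem.List.pyGetD (d0 :: xs) i 0)) ([], d0)).2]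
      = merge_small_deltas_alt (d0 :: xs) threshold
    rw [PySem.List.foldl_pyRange_pyGetD' (d0 :: xs) 0 (pvStep threshold) ([], d0) (a := 1) (by norm_num)]
    simp only [Int.toNat_one, List.drop_succ_cons, List.drop_zero]
    rw [pvLoop_eq threshold xs [] d0, pvAlt_cons]
    simp
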